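-- pv_equiv track=rewrite | github.com/galacticue06/ast | lexer.py | find
-- ===== SOURCE A (Python) =====
-- alph = ['_','a', 'b', 'c', 'd', 'e', 'f', 'g', 'h', 'i', 'j', 'k', 'l', 'm', 'n', 'o', 'p', 'q', 'r', 's', 't', 'u', 'v', 'w', 'x', 'y', 'z']
--
-- def find(string):
--     con = []
--     fun = []
--     seq = ""
--     tog = 0
--     for i in range(len(string)):
--         c = string[i]
--         if c in alph or c.lower() in alph:
--             tog = 1
--             seq += c
--         else:
--             if tog:
--                 acs = 1
--                 try:
--                     if c == "(":
--                         acs = 0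
--                 except:
--                     pass
--                 if acs:
--                     if not seq in con:
--                         con.append(seq)
--                 else:
--                     if not seq in fun:
--                         fun.append(seq)
--                 seq = ""
--                 tog = 0
--     if seq!="":
--         if not seq in con:
--             con.append(seq)
--     return con,fun
-- ===== SOURCE B (Python) =====
-- import re
--
-- def find(string):
--     con = []
--     fun = []
--     for m in re.finditer(r'[A-Za-z_]+', string):
--         tok = m.group()
--         if m.end() < len(string) and string[m.end()] == '(':
--             if tok not in fun:
--                 fun.append(tok)
--         else:
--             if tok not in con:
--                 con.append(tok)
--     return con, fun
-- ===== Notes on version B (the rewrite author's own statement) =====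
-- stated objective: faster
-- what changed: Replaces the char-by-char tog/seq state machine with re.finditer over [A-Za-z_]+ runs, classifying each whole match by the character right after it.
import Mathlib
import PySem

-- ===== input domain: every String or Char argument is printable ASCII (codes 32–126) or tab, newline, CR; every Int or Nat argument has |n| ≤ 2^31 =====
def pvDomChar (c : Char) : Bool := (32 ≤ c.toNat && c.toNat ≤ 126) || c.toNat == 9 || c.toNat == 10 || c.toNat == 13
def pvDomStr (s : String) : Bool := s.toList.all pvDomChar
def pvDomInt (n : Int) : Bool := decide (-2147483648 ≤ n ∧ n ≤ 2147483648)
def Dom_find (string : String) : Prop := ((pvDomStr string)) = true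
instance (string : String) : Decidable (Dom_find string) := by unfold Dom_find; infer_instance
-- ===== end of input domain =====

-- B replaces A's char-by-char tog/seq state machine with a regex-style scan over
-- maximal [A-Za-z_]+ runs, classifying each whole run by the character after it (idiomatic).

-- ===== PORT A =====
def pyAlph : List Char := ['_','a','b','c','d','e','f','g','h','i','j','k','l','m','n','o','p','q','r','s','t','u','v','w','x','y','z']

-- the loop test `c in alph or c.lower() in alph`
def identA (c : Char) : Bool := pyAlph.contains c || pyAlph.contains (PySem.Chars.lowerChar c)

-- the for-loop over the string's characters, state (con, fun, seq, tog)
def findLoop : List Char → List String → List String → List Char → Nat →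
    List String × List String × List Char
  | [], con, fn, seq, _ => (con, fn, seq)
  | c :: cs, con, fn, seq, tog =>
    if identA c then findLoop cs con fn (seq ++ [c]) 1
    else if tog ≠ 0 then
      -- the try/except around `if c == "(":` can never raise; acs = 0 iff c == '('
      let acs : Nat := if c = '(' then 0 else 1
      if acs ≠ 0 then
        findLoop cs (if String.mk seq ∈ con then con else con ++ [String.mk seq]) fn [] 0
      else
        findLoop cs con (if String.mk seq ∈ fn then fn else fn ++ [String.mk seq]) [] 0
    else findLoop cs con fn seq tog

-- the trailing `if seq != "":` block after the loop
def finishA : List String × List String × List Char → List String × List String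
  | (con, fn, seq) =>
    ((if seq ≠ [] then (if String.mk seq ∈ con then con else con ++ [String.mk seq]) else con), fn)

def find (string : String) : List String × List String :=
  finishA (findLoop string.toList [] [] [] 0)

-- ===== PORT B =====
-- the regex character class [A-Za-z_]
def identB (c : Char) : Bool := c == '_' || ('A' ≤ c && c ≤ 'Z') || ('a' ≤ c && c ≤ 'z')

-- re.finditer(r'[A-Za-z_]+', s): each maximal run, paired with the character following it
def tokens : List Char → List (List Char × Option Char)
  | [] => []
  | c :: cs =>
    if identB c then
      (c :: cs.takeWhile identB, (cs.dropWhile identB).head?) :: tokens (cs.dropWhile identB)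
    else tokens cs
  termination_by l => l.length
  decreasing_by
    · exact Nat.lt_succ_of_le (List.length_dropWhile_le ..)
    · simp

-- the for-loop over matches: next char '(' → fun, otherwise (including end of string) → con
def findLoopB : List (List Char × Option Char) → List String → List String →
    List String × List String
  | [], con, fn => (con, fn)
  | (run, nc) :: ts, con, fn =>
    if nc = some '(' then
      findLoopB ts con (if String.mk run ∈ fn then fn else fn ++ [String.mk run])
    else
      findLoopB ts (if String.mk run ∈ con then con else con ++ [String.mk run]) fn

def find_alt (string : String) : List String × List String :=
  findLoopB (tokens string.toList) [] []

-- ===== PRECONDITION & SPEC =====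
def Spec_find (string : String) (out : List String × List String) : Prop := out = find_alt string
instance (string : String) (out : List String × List String) : Decidable (Spec_find string out) := by unfold Spec_find; infer_instance

-- ===== CLAIM (what is proved, stated in full; the proofs are below) =====
def Claim_equal_find : Prop := ∀ (string : String), Dom_find string → Spec_find string (find string)

-- ===== LEMMAS AND PROOFS =====
set_option maxRecDepth 4000 in
theorem ident_eq_small : ∀ n ∈ List.range 128, identA (Char.ofNat n) = identB (Char.ofNat n) := by
  decide

theorem ident_eq (c : Char) (h : pvDomChar c = true) : identA c = identB c := by
  have hlt : c.toNat < 128 := by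
    simp [pvDomChar] at h
    omega
  have := ident_eq_small c.toNat (List.mem_range.mpr hlt)
  rwa [Char.ofNat_toNat] at this

theorem run_lemma (run : List Char) (cs : List Char) (con fn : List String) (seq : List Char)
    (h : ∀ c ∈ run, identA c = true) :
    findLoop (run ++ cs) con fn seq 1 = findLoop cs con fn (seq ++ run) 1 := by
  induction run generalizing seq with
  | nil => simp
  | cons c run ih =>
    have hc : identA c = true := h c (List.mem_cons_self ..)
    simp only [List.cons_append, findLoop, hc, if_pos]
    rw [ih _ (fun d hd => h d (List.mem_cons_of_mem _ hd))]
    simp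

theorem dropWhile_head_false {α : Type} (p : α → Bool) (l : List α) (d : α) (t : List α)
    (h : l.dropWhile p = d :: t) : p d = false := by
  induction l with
  | nil => simp at h
  | cons a l ih =>
    by_cases ha : p a
    · rw [List.dropWhile_cons_of_pos ha] at h
      exact ih h
    · rw [List.dropWhile_cons_of_neg ha] at h
      cases h
      simpa using ha

theorem main_lemma (cs : List Char) (con fn : List String)
    (h : ∀ c ∈ cs, pvDomChar c = true) :
    finishA (findLoop cs con fn [] 0) = findLoopB (tokens cs) con fn := by
  match cs with
  | [] => simp [findLoop, tokens, findLoopB, finishA]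
  | c :: cs =>
    have hdc : pvDomChar c = true := h c (List.mem_cons_self ..)
    by_cases hc : identB c
    · have hac : identA c = true := (ident_eq c hdc).symm ▸ hc
      have hsplit : cs.takeWhile identB ++ cs.dropWhile identB = cs :=
        List.takeWhile_append_dropWhile
      have htk : ∀ d ∈ cs.takeWhile identB, identA d = true := by
        intro d hd
        have hdm : d ∈ cs := (List.takeWhile_prefix identB).subset hd
        rw [ident_eq d (h d (List.mem_cons_of_mem _ hdm))]
        exact List.mem_takeWhile_imp hd
      have step1 : findLoop (c :: cs) con fn [] 0
          = findLoop (cs.dropWhile identB) con fn (c :: cs.takeWhile identB) 1 := by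
        simp only [findLoop, hac, if_pos]
        conv_lhs => rw [← hsplit]
        rw [run_lemma _ _ _ _ _ htk]
        simp
      rw [step1, tokens, if_pos hc]
      match hrest : cs.dropWhile identB with
      | [] =>
        simp [findLoop, finishA, findLoopB, tokens]
      | d :: rest =>
        have hdb : identB d = false := dropWhile_head_false identB cs d rest hrest
        have hsub : ∀ e ∈ d :: rest, e ∈ cs := fun e he =>
          (List.dropWhile_suffix identB).subset (hrest ▸ he)
        have hda : identA d = false := by
          rw [ident_eq d (h d (List.mem_cons_of_mem _ (hsub d (List.mem_cons_self ..))))]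
          exact hdb
        have hrdom : ∀ e ∈ rest, pvDomChar e = true := fun e he =>
          h e (List.mem_cons_of_mem _ (hsub e (List.mem_cons_of_mem _ he)))
        have hlen : rest.length < cs.length := by
          have h1 : (cs.dropWhile identB).length ≤ cs.length := List.length_dropWhile_le ..
          rw [hrest] at h1
          simp only [List.length_cons] at h1
          omega
        rw [tokens, if_neg (by simp [hdb])]
        simp only [List.head?]
        by_cases hpar : d = '('
        · subst hpar
          simp only [findLoop, hda, Bool.false_eq_true, if_false, ne_eq, if_true, findLoopB]
          exact main_lemma rest con
            (if String.mk (c :: cs.takeWhile identB) ∈ fn then fn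
             else fn ++ [String.mk (c :: cs.takeWhile identB)]) hrdom
        · have hnp : ¬ (some d = some '(') := by simpa using hpar
          simp only [findLoop, hda, Bool.false_eq_true, if_false, ne_eq, if_neg hpar,
            findLoopB, if_neg hnp]
          exact main_lemma rest
            (if String.mk (c :: cs.takeWhile identB) ∈ con then con
             else con ++ [String.mk (c :: cs.takeWhile identB)]) fn hrdom
    · have hac : identA c = false := by
        rw [ident_eq c hdc]
        simpa using hc
      rw [tokens, if_neg (by simp [hc])]
      simp only [findLoop, hac, Bool.false_eq_true, if_false, ne_eq, not_true_eq_false]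
      exact main_lemma cs con fn (fun d hd => h d (List.mem_cons_of_mem _ hd))
  termination_by cs.length
  decreasing_by
    · simp only [List.length_cons]; omega
    · simp only [List.length_cons]; omega
    · simp

-- ===== VERDICT (by name: the statement is the Claim_ definition above) =====
theorem find_spec : Claim_equal_find := by
  intro string hdom
  unfold Spec_find find find_alt
  apply main_lemma
  intro c hcmem
  have h2 : pvDomStr string = true := hdom
  simp only [pvDomStr, List.all_eq_true] at h2
  exact h2 c hcmem
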